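-- pv_equiv track=rewrite | github.com/barteksmolkowski/150-funkcji-w-praktyce | 150_metod/11-20_zadan.py | remove_repetitive
-- ===== SOURCE A (Python) =====
-- def remove_repetitive(numbers):
--     def has_repetitive_digits(number):
--         digits = str(number)
--         return len(digits) != len(set(digits))
--
--     result = []
--     for number in numbers:
--         if not has_repetitive_digits(number):
--             result.append(number)
--     return result
-- ===== SOURCE B (Python) =====
-- def remove_repetitive(numbers):
--     def is_repetitive(number):
--         s = sorted(str(number))
--         return any(a == b for a, b in zip(s, s[1:]))
--     return [n for n in numbers if not is_repetitive(n)]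
-- ===== Notes on version B (the rewrite author's own statement) =====
-- stated objective: idiomatic
-- what changed: The accumulator loop with a set-cardinality test is replaced by a list comprehension whose helper sorts str(number) and detects a duplicate by scanning adjacent pairs of the sorted characters.
import Mathlib
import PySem

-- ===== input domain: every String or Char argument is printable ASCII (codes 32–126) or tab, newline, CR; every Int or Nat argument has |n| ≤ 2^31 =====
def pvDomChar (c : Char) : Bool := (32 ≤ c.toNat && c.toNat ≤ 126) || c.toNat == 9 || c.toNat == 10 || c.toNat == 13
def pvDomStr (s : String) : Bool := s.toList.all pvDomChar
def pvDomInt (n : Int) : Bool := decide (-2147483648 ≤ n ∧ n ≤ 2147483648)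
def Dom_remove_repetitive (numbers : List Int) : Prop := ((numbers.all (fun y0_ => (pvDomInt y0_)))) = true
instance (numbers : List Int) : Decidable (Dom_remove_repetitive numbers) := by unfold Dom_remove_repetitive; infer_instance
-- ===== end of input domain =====

-- ===== PORT A =====
-- B replaces A's set-cardinality duplicate test by a sort-and-adjacent-scan helper inside a comprehension (objective: idiomatic).
-- helper: Python's inner 'has_repetitive_digits' — len(str(n)) != len(set(str(n)))
def pvHasRepetitiveDigits (number : Int) : Bool :=
  let digits := PySem.Int.toChars number
  decide (digits.length ≠ (PySem.Set.ofList digits).length)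

def remove_repetitive (numbers : List Int) : List Int :=
  numbers.foldl (fun result number =>
    if !(pvHasRepetitiveDigits number) then result ++ [number] else result) []

-- ===== PORT B =====
-- helper: any(a == b for a, b in zip(s, s[1:])) — adjacent-equality scan
def pvAdjEq : List Char → Bool
  | a :: b :: t => a == b || pvAdjEq (b :: t)
  | _ => false

-- helper: B's inner 'is_repetitive' — sort str(number), then scan adjacent pairs
def pvIsRepetitive (number : Int) : Bool :=
  pvAdjEq (PySem.List.sorted (PySem.Int.toChars number) (fun c => c) false)

def remove_repetitive_alt (numbers : List Int) : List Int :=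
  numbers.filter (fun n => !(pvIsRepetitive n))

-- ===== PRECONDITION & SPEC =====
def Spec_remove_repetitive (numbers : List Int) (out : List Int) : Prop := out = remove_repetitive_alt numbers
instance (numbers : List Int) (out : List Int) : Decidable (Spec_remove_repetitive numbers out) := by unfold Spec_remove_repetitive; infer_instance

-- ===== CLAIM (what is proved, stated in full; the proofs are below) =====
def Claim_equal_remove_repetitive : Prop := ∀ (numbers : List Int), Dom_remove_repetitive numbers → Spec_remove_repetitive numbers (remove_repetitive numbers)

-- ===== LEMMAS AND PROOFS =====

-- set(xs) keeps the first occurrences, in order: a sublist of xs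
theorem pv_ofList_sublist {α : Type} [BEq α] [LawfulBEq α] (xs : List α) :
    (PySem.Set.ofList xs).Sublist xs := by
  induction xs with
  | nil => simp [PySem.Set.ofList]
  | cons x xs ih =>
    rw [PySem.Set.ofList_cons]
    exact List.Sublist.cons₂ x ((List.filter_sublist).trans ih)

-- set(xs) has the same length as xs exactly when xs has no duplicates
theorem pv_len_ofList_eq_iff {α : Type} [BEq α] [LawfulBEq α] (xs : List α) :
    (PySem.Set.ofList xs).length = xs.length ↔ xs.Nodup := by
  constructor
  · intro h
    have := (pv_ofList_sublist xs).eq_of_length h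
    rw [← this]
    exact PySem.Set.nodup_ofList xs
  · intro h
    rw [PySem.Set.ofList_eq_self_of_nodup xs h]

-- the adjacent scan returns false exactly when no two neighbours are equal
theorem pv_adjEq_false_iff (l : List Char) : pvAdjEq l = false ↔ l.IsChain (· ≠ ·) := by
  induction l with
  | nil => simp [pvAdjEq]
  | cons a t ih =>
    cases t with
    | nil => simp [pvAdjEq]
    | cons b t' =>
      rw [List.isChain_cons_cons, ← ih]
      simp [pvAdjEq]

-- on a ≤-sorted list, "no equal neighbours" is the same as Nodup
theorem pv_chain_ne_iff_nodup (l : List Char) (h : l.Pairwise (· ≤ ·)) :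
    l.IsChain (· ≠ ·) ↔ l.Nodup := by
  constructor
  · intro hc
    have hlt : l.IsChain (· < ·) := by
      induction l with
      | nil => exact List.IsChain.nil
      | cons a t ih =>
        cases t with
        | nil => exact List.isChain_singleton a
        | cons b t' =>
          rw [List.isChain_cons_cons] at hc ⊢
          rw [List.pairwise_cons] at h
          exact ⟨lt_of_le_of_ne (h.1 b (by simp)) hc.1, ih h.2 hc.2⟩
    have := List.isChain_iff_pairwise.mp hlt
    exact this.imp ne_of_lt
  · intro hn
    exact (List.Pairwise.isChain hn)

-- the two duplicate tests agree on every number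
theorem pv_rep_eq (n : Int) : pvHasRepetitiveDigits n = pvIsRepetitive n := by
  rcases hb : pvIsRepetitive n with _ | _
  · unfold pvIsRepetitive at hb
    rw [pv_adjEq_false_iff] at hb
    rw [pv_chain_ne_iff_nodup _ (PySem.List.sorted_pairwise _ _)] at hb
    have hnodup := (PySem.List.sorted_perm (PySem.Int.toChars n) (fun c => c) false).nodup_iff.mp hb
    unfold pvHasRepetitiveDigits
    simp [(pv_len_ofList_eq_iff (PySem.Int.toChars n)).mpr hnodup]
  · unfold pvIsRepetitive at hb
    have hnc : ¬ (PySem.List.sorted (PySem.Int.toChars n) (fun c => c) false).Nodup := by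
      intro hch
      rw [(pv_adjEq_false_iff _).mpr
        ((pv_chain_ne_iff_nodup _ (PySem.List.sorted_pairwise _ _)).mpr hch)] at hb
      exact Bool.false_ne_true hb
    have hnodup := fun h => hnc ((PySem.List.sorted_perm (PySem.Int.toChars n) (fun c => c) false).nodup_iff.mpr h)
    unfold pvHasRepetitiveDigits
    simp only [decide_eq_true_eq, ne_eq]
    intro h
    exact hnodup ((pv_len_ofList_eq_iff (PySem.Int.toChars n)).mp h.symm)

-- ===== VERDICT (by name: the statement is the Claim_ definition above) =====
theorem remove_repetitive_spec : Claim_equal_remove_repetitive := by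
  intro numbers _
  unfold Spec_remove_repetitive remove_repetitive remove_repetitive_alt
  rw [PySem.List.foldl_append_if_eq_filter]
  simp [pv_rep_eq]
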